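-- pv_equiv track=rewrite | github.com/aolsenjazz/cybach | phrasing.py | potential_strong_beat_permutations
-- ===== SOURCE A (Python) =====
-- import itertools
-- import math
--
-- def potential_strong_beat_permutations(numerator):
--     """
--     Returns a tuple of all possible strong beat permutations for a given time signature numerator. Permutations
--     are groups of 2, 3, and occasionally 4. Each number represents a phrase grouping.
--
--     E.g. 4/4 would receive (0, 1, 2, 3), 3/4 would receive (0, 1, 2), and 5/4 would receive (0, 2), (0, 3)
--
--     :param numerator:
--     :return:
--     """
--     if numerator <= 4:
--         return [tuple(i for i in range(0, numerator))]
--     else: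
--         max_phrases = int(math.floor(numerator / 2))
--
--         potential_combinations = [[0, 2, 3, 4] for i in range(max_phrases)]
--         parsed = {tuple(j for j in unfiltered_sublist if j != 0)
--                   for unfiltered_sublist
--                   in [i for i in itertools.product(*potential_combinations) if sum(i) == numerator]}
--         return [tuple([0] + [sublist[i] + sum(sublist[:i]) for i in range(len(sublist[:-1]))]) for sublist in parsed]
-- ===== SOURCE B (Python) =====
-- def potential_strong_beat_permutations(numerator):
--     """Directly generates only the valid groupings (compositions of the
--     numerator into parts 2, 3, 4) and collects them into a set, instead of
--     filtering the full itertools.product space of 4**(numerator//2)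
--     candidates."""
--     if numerator <= 4:
--         return [tuple(i for i in range(0, numerator))]
--
--     def parts(total, k):
--         # all compositions of `total` into exactly k parts from {2, 3, 4}, lexicographic
--         if k == 0:
--             return [()] if total == 0 else []
--         return [(p,) + rest
--                 for p in (2, 3, 4) if 0 <= total - p
--                 for rest in parts(total - p, k - 1)]
--
--     parsed = set()
--     for k in range(1, numerator // 2 + 1):
--         parsed.update(parts(numerator, k))
--
--     result = []
--     for sublist in parsed:
--         acc = 0
--         pref = []
--         for p in sublist[:-1]:
--             acc += p
--             pref.append(acc)
--         result.append(tuple([0] + pref))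
--     return result
-- ===== Notes on version B (the rewrite author's own statement) =====
-- stated objective: alternative
-- what changed: A enumerates all itertools.product candidates over numerator//2 slots of {0,2,3,4}, filters them by sum and deduplicates through a set; B recursively generates only the valid compositions of the numerator into parts {2,3,4}, grouped by part count, and collects them into the same set, so no invalid candidate is ever built.
import Mathlib
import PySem

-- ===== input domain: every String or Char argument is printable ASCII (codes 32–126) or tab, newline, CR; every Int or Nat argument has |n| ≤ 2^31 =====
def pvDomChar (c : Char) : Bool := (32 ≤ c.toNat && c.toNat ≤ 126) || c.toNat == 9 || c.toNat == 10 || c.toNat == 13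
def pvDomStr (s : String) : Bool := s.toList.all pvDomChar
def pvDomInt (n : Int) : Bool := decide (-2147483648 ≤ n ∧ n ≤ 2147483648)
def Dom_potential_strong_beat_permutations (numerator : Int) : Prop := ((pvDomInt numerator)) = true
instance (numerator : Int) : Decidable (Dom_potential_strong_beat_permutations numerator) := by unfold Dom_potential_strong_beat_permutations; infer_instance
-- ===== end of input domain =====

-- B replaces A's filter over the full itertools.product candidate space by direct recursive
-- generation of only the valid compositions of the numerator into parts {2,3,4}, collected
-- into the same set, so no invalid candidate is ever built.
-- Python set iteration order is modelled as insertion order by PySem.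


-- ===== PORT A =====
-- itertools.product(*lists): leftmost factor varies slowest (CPython order)
def pyProduct (ls : List (List Int)) : List (List Int) :=
  match ls with
  | [] => [[]]
  | xs :: rest => xs.flatMap (fun x => (pyProduct rest).map (x :: ·))

def potential_strong_beat_permutations (numerator : Int) : List (List Int) :=
  if numerator ≤ 4 then
    [PySem.List.pyRange 0 numerator 1]
  else
    -- int(math.floor(numerator / 2)): exact for |numerator| ≤ 2^31 (float division is exact there)
    let max_phrases : Int := PySem.Int.floordiv numerator 2
    let potential_combinations : List (List Int) :=
      (PySem.List.pyRange 0 max_phrases 1).map (fun _ => [0, 2, 3, 4])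
    let parsed : PySem.Set (List Int) :=
      PySem.Set.ofList
        (((pyProduct potential_combinations).filter (fun i => i.sum == numerator)).map
          (fun unfiltered_sublist => unfiltered_sublist.filter (fun j => j != 0)))
    -- iterating the set into a list: PySem models insertion order (Python hash order is not
    -- modelled; the task compares the returned lists as sets).
    -- sublist[i] is always in range (i < len(sublist[:-1])), so pyGetD is exact here.
    parsed.map (fun sublist =>
      0 :: (PySem.List.pyRange 0 ((PySem.List.slice sublist none (some (-1))).length : Int) 1).map
        (fun i => PySem.List.pyGetD sublist i 0 + (PySem.List.slice sublist none (some i)).sum))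

-- ===== PORT B =====
-- all compositions of `total` into exactly k parts from {2,3,4}, lexicographic
def pvParts (total : Int) (k : Nat) : List (List Int) :=
  match k with
  | 0 => if total = 0 then [[]] else []
  | k + 1 =>
      [(2 : Int), 3, 4].flatMap (fun p =>
        if 0 ≤ total - p then (pvParts (total - p) k).map (p :: ·) else [])

-- acc/pref loop over comp[:-1]
def pvPrefix (comp : List Int) : List Int :=
  0 :: ((PySem.List.slice comp none (some (-1))).foldl
        (fun (s : Int × List Int) p => (s.1 + p, s.2 ++ [s.1 + p])) (0, [])).2

def potential_strong_beat_permutations_alt (numerator : Int) : List (List Int) :=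
  if numerator ≤ 4 then
    [PySem.List.pyRange 0 numerator 1]
  else
    -- k from range(1, numerator//2 + 1) is ≥ 1, so k.toNat is exact
    let parsed : PySem.Set (List Int) :=
      (PySem.List.pyRange 1 (PySem.Int.floordiv numerator 2 + 1) 1).foldl
        (fun s k => PySem.Set.update s (pvParts numerator k.toNat)) PySem.Set.empty
    -- iterating the set into a list: insertion order, as in port A
    parsed.map pvPrefix

-- ===== PRECONDITION & SPEC =====
def Spec_potential_strong_beat_permutations (numerator : Int) (out : List (List Int)) : Prop := out = potential_strong_beat_permutations_alt numerator
instance (numerator : Int) (out : List (List Int)) : Decidable (Spec_potential_strong_beat_permutations numerator out) := by unfold Spec_potential_strong_beat_permutations; infer_instance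

-- ===== CLAIM (what is proved, stated in full; the proofs are below) =====
def Claim_equal_potential_strong_beat_permutations : Prop := ∀ (numerator : Int), Dom_potential_strong_beat_permutations numerator → Spec_potential_strong_beat_permutations numerator (potential_strong_beat_permutations numerator)

-- ===== LEMMAS AND PROOFS =====

-- `Fm n m` = the stripped, sum-filtered product list A builds (before set dedup)
def Fm (n : Int) (m : Nat) : List (List Int) :=
  ((pyProduct (List.replicate m [0, 2, 3, 4])).filter (fun i => i.sum == n)).map
    (fun u => u.filter (fun j => j != 0))

-- `Cm n m` = B's compositions, grouped by part count 0..m, lexicographic within each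
def Cm (n : Int) (m : Nat) : List (List Int) :=
  (List.range (m + 1)).flatMap (fun k => pvParts n k)

theorem pvFoldlAdd (xs : List (List Int)) : ∀ (s t : List (List Int)),
    xs.foldl PySem.Set.add (s ++ t)
      = s ++ (xs.filter (fun x => decide (x ∉ s))).foldl PySem.Set.add t := by
  induction xs with
  | nil => simp
  | cons x xs ih =>
    intro s t
    simp only [List.foldl_cons, List.filter_cons]
    by_cases hx : x ∈ s
    · have h1 : PySem.Set.add (s ++ t) x = s ++ t := by
        simp [PySem.Set.add, List.contains_eq_mem, hx]
      rw [h1]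
      simp only [hx, not_true_eq_false, decide_false, if_neg Bool.false_ne_true]
      exact ih s t
    · have h1 : PySem.Set.add (s ++ t) x = s ++ PySem.Set.add t x := by
        by_cases ht : x ∈ t
        · simp [PySem.Set.add, List.contains_eq_mem, hx, ht]
        · simp [PySem.Set.add, List.contains_eq_mem, hx, ht]
      rw [h1]
      simp only [hx, not_false_eq_true, decide_true]
      exact ih s (PySem.Set.add t x)

theorem ofList_append (a b : List (List Int)) :
    PySem.Set.ofList (a ++ b)
      = PySem.Set.ofList a ++ PySem.Set.ofList (b.filter (fun x => decide (x ∉ a))) := by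
  rw [PySem.Set.ofList_eq_foldl, PySem.Set.ofList_eq_foldl, PySem.Set.ofList_eq_foldl,
    List.foldl_append]
  have h0 : b.foldl PySem.Set.add (a.foldl PySem.Set.add [])
      = b.foldl PySem.Set.add (a.foldl PySem.Set.add [] ++ []) := by simp
  rw [h0, pvFoldlAdd]
  have h1 : b.filter (fun x => decide (x ∉ a.foldl PySem.Set.add []))
      = b.filter (fun x => decide (x ∉ a)) := by
    apply List.filter_congr
    intro x _
    have : x ∈ a.foldl PySem.Set.add [] ↔ x ∈ a := by
      rw [← PySem.Set.ofList_eq_foldl]; exact PySem.Set.mem_ofList a x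
    simp [this]
  rw [h1]

theorem pvFoldlFilter (p : List Int → Bool) (l : List (List Int)) : ∀ (s : List (List Int)),
    (l.filter p).foldl PySem.Set.add (s.filter p) = (l.foldl PySem.Set.add s).filter p := by
  induction l with
  | nil => intro s; simp
  | cons x l ih =>
    intro s
    simp only [List.filter_cons, List.foldl_cons]
    by_cases hp : p x = true
    · have hadd : PySem.Set.add (s.filter p) x = (PySem.Set.add s x).filter p := by
        by_cases hs : x ∈ s
        · simp [PySem.Set.add, List.contains_eq_mem, hs, hp]
        · simp [PySem.Set.add, List.contains_eq_mem, hs, hp, List.filter_append]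
      simp only [hp, if_true, List.foldl_cons, hadd]
      exact ih (PySem.Set.add s x)
    · have hadd : (PySem.Set.add s x).filter p = s.filter p := by
        by_cases hs : x ∈ s
        · simp [PySem.Set.add, List.contains_eq_mem, hs]
        · simp [PySem.Set.add, List.contains_eq_mem, hs, List.filter_append, hp]
      simp only [hp]
      rw [← hadd]
      exact ih (PySem.Set.add s x)

theorem ofList_filter (p : List Int → Bool) (l : List (List Int)) :
    PySem.Set.ofList (l.filter p) = (PySem.Set.ofList l).filter p := by
  rw [PySem.Set.ofList_eq_foldl, PySem.Set.ofList_eq_foldl]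
  have := pvFoldlFilter p l []
  simpa using this

theorem ofList_map_cons (x : Int) (l : List (List Int)) :
    PySem.Set.ofList (l.map (x :: ·)) = (PySem.Set.ofList l).map (x :: ·) := by
  rw [PySem.Set.ofList_eq_foldl, PySem.Set.ofList_eq_foldl]
  have key : ∀ (l s : List (List Int)),
      (l.map (x :: ·)).foldl PySem.Set.add (s.map (x :: ·))
        = (l.foldl PySem.Set.add s).map (x :: ·) := by
    intro l
    induction l with
    | nil => intro s; simp
    | cons y l ih =>
      intro s
      simp only [List.map_cons, List.foldl_cons]
      have hadd : PySem.Set.add (s.map (x :: ·)) (x :: y) = (PySem.Set.add s y).map (x :: ·) := by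
        by_cases hs : y ∈ s
        · simp [PySem.Set.add, List.contains_eq_mem, hs]
        · simp [PySem.Set.add, List.contains_eq_mem, hs]
      rw [hadd]
      exact ih (PySem.Set.add s y)
  simpa using key l []

theorem F_succ (n : Int) (m : Nat) :
    Fm n (m + 1)
      = Fm n m ++ ((Fm (n - 2) m).map ((2 : Int) :: ·)
          ++ (Fm (n - 3) m).map ((3 : Int) :: ·)
          ++ (Fm (n - 4) m).map ((4 : Int) :: ·)) := by
  have key : ∀ (x : Int) (P : List (List Int)),
      (P.map (x :: ·)).filter (fun i => i.sum == n)
        = (P.filter (fun i => i.sum == n - x)).map (x :: ·) := by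
    intro x P
    rw [List.filter_map]
    congr 1
    apply List.filter_congr
    intro u _
    rw [Bool.eq_iff_iff]
    simp only [Function.comp_apply, List.sum_cons, beq_iff_eq]
    omega
  have hP : pyProduct (List.replicate (m + 1) [0, 2, 3, 4])
      = ((pyProduct (List.replicate m [0, 2, 3, 4])).map ((0 : Int) :: ·))
        ++ (((pyProduct (List.replicate m [0, 2, 3, 4])).map ((2 : Int) :: ·))
        ++ (((pyProduct (List.replicate m [0, 2, 3, 4])).map ((3 : Int) :: ·))
        ++ ((pyProduct (List.replicate m [0, 2, 3, 4])).map ((4 : Int) :: ·)))) := by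
    rw [List.replicate_succ]
    simp [pyProduct, List.flatMap_cons]
  unfold Fm
  rw [hP]
  simp only [List.filter_append, List.map_append]
  rw [key 0, key 2, key 3, key 4]
  simp only [List.map_map]
  have e0 : ((pyProduct (List.replicate m [0, 2, 3, 4])).filter (fun i => i.sum == n - 0)).map
        ((fun u => u.filter (fun j => j != 0)) ∘ (fun c => (0 : Int) :: c))
      = ((pyProduct (List.replicate m [0, 2, 3, 4])).filter (fun i => i.sum == n)).map
        (fun u => u.filter (fun j => j != 0)) := by
    rw [show n - 0 = n by ring]
    exact List.map_congr_left (fun u _ => by simp)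
  have ex : ∀ (x : Int), x ≠ 0 → ∀ (Q : List (List Int)),
      Q.map ((fun u => u.filter (fun j => j != 0)) ∘ (fun c => x :: c))
        = (Q.map (fun u => u.filter (fun j => j != 0))).map (x :: ·) := by
    intro x hx Q
    rw [List.map_map]
    exact List.map_congr_left (fun u _ => by simp [hx])
  rw [e0, ex 2 (by norm_num), ex 3 (by norm_num), ex 4 (by norm_num)]
  simp [List.append_assoc]

theorem mem_F (m : Nat) : ∀ (n : Int) (c : List Int),
    c ∈ Fm n m ↔ ((∀ x ∈ c, x = 2 ∨ x = 3 ∨ x = 4) ∧ c.sum = n ∧ c.length ≤ m) := by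
  induction m with
  | zero =>
    intro n c
    by_cases h : n = 0
    · subst h
      have hz : Fm 0 0 = [[]] := by simp [Fm, pyProduct]
      rw [hz]
      constructor
      · intro h'
        have : c = [] := by simpa using h'
        subst this; simp
      · rintro ⟨_, hs, hl⟩
        cases c with
        | nil => simp
        | cons a t => simp at hl
    · have hz : Fm n 0 = [] := by
        have hb : ((0 : Int) == n) = false := by
          simp only [beq_eq_false_iff_ne]
          exact fun e => h e.symm
        simp [Fm, pyProduct, hb]
      rw [hz]
      simp only [List.not_mem_nil, false_iff]
      rintro ⟨_, hs, hl⟩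
      cases c with
      | nil => exact h (by simpa using hs.symm)
      | cons a t => simp at hl
  | succ m ih =>
    intro n c
    have hcons : ∀ (x : Int), x = 2 ∨ x = 3 ∨ x = 4 → ∀ a : List Int, a ∈ Fm (n - x) m →
        ((∀ y ∈ x :: a, y = 2 ∨ y = 3 ∨ y = 4) ∧ (x :: a).sum = n ∧ (x :: a).length ≤ m + 1) := by
      intro x hx a ha
      obtain ⟨he, hs, hl⟩ := (ih _ a).mp ha
      refine ⟨?_, ?_, ?_⟩
      · intro y hy
        rcases List.mem_cons.mp hy with rfl | hy
        · exact hx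
        · exact he y hy
      · rw [List.sum_cons, hs]; ring
      · simp only [List.length_cons]; omega
    rw [F_succ]
    simp only [List.mem_append, List.mem_map]
    constructor
    · rintro (h | (⟨a, ha, rfl⟩ | ⟨a, ha, rfl⟩) | ⟨a, ha, rfl⟩)
      · obtain ⟨he, hs, hl⟩ := (ih n c).mp h
        exact ⟨he, hs, Nat.le_succ_of_le hl⟩
      · exact hcons 2 (by norm_num) a ha
      · exact hcons 3 (by norm_num) a ha
      · exact hcons 4 (by norm_num) a ha
    · rintro ⟨he, hs, hl⟩
      by_cases hlm : c.length ≤ m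
      · exact Or.inl ((ih n c).mpr ⟨he, hs, hlm⟩)
      · cases c with
        | nil => exact absurd (by simp : ([] : List Int).length ≤ m) hlm
        | cons a t =>
          have hat : ∀ x ∈ t, x = 2 ∨ x = 3 ∨ x = 4 := fun x hx => he x (List.mem_cons_of_mem a hx)
          have hlt : t.length ≤ m := by simpa using hl
          have hsum : t.sum = n - a := by simp only [List.sum_cons] at hs; omega
          rcases he a List.mem_cons_self with rfl | rfl | rfl
          · exact Or.inr (Or.inl (Or.inl ⟨t, (ih _ t).mpr ⟨hat, hsum, hlt⟩, rfl⟩))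
          · exact Or.inr (Or.inl (Or.inr ⟨t, (ih _ t).mpr ⟨hat, hsum, hlt⟩, rfl⟩))
          · exact Or.inr (Or.inr ⟨t, (ih _ t).mpr ⟨hat, hsum, hlt⟩, rfl⟩)

theorem parts_shape (k : Nat) : ∀ (t : Int) (c : List Int), c ∈ pvParts t k → c.length = k := by
  induction k with
  | zero =>
    intro t c hc
    simp only [pvParts] at hc
    split at hc
    · simp only [List.mem_singleton] at hc
      subst hc; rfl
    · simp at hc
  | succ k ih =>
    intro t c hc
    simp only [pvParts, List.flatMap_cons, List.flatMap_nil, List.append_nil,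
      List.mem_append] at hc
    rcases hc with hc | hc | hc <;>
    · split at hc
      · obtain ⟨a, ha, rfl⟩ := List.mem_map.mp hc
        simp [ih _ a ha]
      · simp at hc

theorem parts_neg (k : Nat) (t : Int) (h : t < 0) : pvParts t k = [] := by
  cases k with
  | zero => simp only [pvParts]; rw [if_neg (by omega)]
  | succ k =>
    simp only [pvParts, List.flatMap_cons, List.flatMap_nil, List.append_nil]
    rw [if_neg (by omega), if_neg (by omega), if_neg (by omega)]
    simp

theorem filter_C (t : Int) (m : Nat) :
    (Cm t m).filter (fun c => decide (c.length = m)) = pvParts t m := by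
  unfold Cm
  rw [List.filter_flatMap, List.range_succ, List.flatMap_append]
  have h1 : (List.range m).flatMap (fun k => (pvParts t k).filter (fun c => decide (c.length = m))) = [] := by
    apply List.flatMap_eq_nil_iff.mpr
    intro k hk
    apply List.filter_eq_nil_iff.mpr
    intro c hc
    have := parts_shape k t c hc
    have hkm : k < m := List.mem_range.mp hk
    simp [this]; omega
  have h2 : (pvParts t m).filter (fun c => decide (c.length = m)) = pvParts t m := by
    apply List.filter_eq_self.mpr
    intro c hc
    simp [parts_shape m t c hc]
  rw [h1, List.nil_append, List.flatMap_cons, List.flatMap_nil, List.append_nil, h2]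

theorem map_cons_ne_disjoint (x y : Int) (hxy : x ≠ y) (L M : List (List Int)) :
    ∀ c ∈ M.map (y :: ·), c ∉ L.map (x :: ·) := by
  intro c hc hmem
  obtain ⟨a, _, rfl⟩ := List.mem_map.mp hc
  obtain ⟨b, _, heq⟩ := List.mem_map.mp hmem
  exact hxy (by injection heq)

theorem ofList_F (m : Nat) : ∀ (n : Int), PySem.Set.ofList (Fm n m) = Cm n m := by
  induction m with
  | zero =>
    intro n
    by_cases h : n = 0
    · subst h
      have hz : Fm 0 0 = [[]] := by simp [Fm, pyProduct]
      rw [hz]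
      simp [Cm, pvParts, PySem.Set.ofList_eq_foldl, PySem.Set.add]
    · have hb : ((0 : Int) == n) = false := by
        simp only [beq_eq_false_iff_ne]
        exact fun e => h e.symm
      have hz : Fm n 0 = [] := by simp [Fm, pyProduct, hb]
      rw [hz]
      simp [Cm, pvParts, h, PySem.Set.ofList_eq_foldl]
  | succ m ih =>
    intro n
    rw [F_succ, ofList_append, ih n]
    -- rewrite the filtered tail into the three length-m blocks
    have hblk : ∀ x : Int, x = 2 ∨ x = 3 ∨ x = 4 →
        (Fm (n - x) m).filter ((fun y => decide (y ∉ Fm n m)) ∘ (fun c => x :: c))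
          = (Fm (n - x) m).filter (fun c => decide (c.length = m)) := by
      intro x hx
      apply List.filter_congr
      intro c hc
      obtain ⟨he, hs, hl⟩ := (mem_F m _ c).mp hc
      rw [Bool.eq_iff_iff]
      simp only [Function.comp_apply, decide_eq_true_eq]
      rw [mem_F m n (x :: c)]
      constructor
      · intro hni
        by_contra hne
        apply hni
        refine ⟨?_, ?_, ?_⟩
        · intro y hy
          rcases List.mem_cons.mp hy with rfl | hy
          · exact hx
          · exact he y hy
        · rw [List.sum_cons, hs]; ring
        · simp only [List.length_cons]; omega
      · intro hcm hmem
        have := hmem.2.2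
        simp only [List.length_cons] at this
        omega
    have hT : ((Fm (n - 2) m).map ((2 : Int) :: ·) ++ (Fm (n - 3) m).map ((3 : Int) :: ·)
          ++ (Fm (n - 4) m).map ((4 : Int) :: ·)).filter (fun y => decide (y ∉ Fm n m))
        = ((Fm (n - 2) m).filter (fun c => decide (c.length = m))).map ((2 : Int) :: ·)
          ++ ((Fm (n - 3) m).filter (fun c => decide (c.length = m))).map ((3 : Int) :: ·)
          ++ ((Fm (n - 4) m).filter (fun c => decide (c.length = m))).map ((4 : Int) :: ·) := by
      simp only [List.filter_append, List.filter_map]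
      rw [hblk 2 (by norm_num), hblk 3 (by norm_num), hblk 4 (by norm_num)]
    rw [hT]
    -- split the three disjoint blocks
    have hd34 : (((Fm (n - 4) m).filter (fun c => decide (c.length = m))).map ((4 : Int) :: ·)).filter
          (fun y => decide (y ∉ ((Fm (n - 2) m).filter (fun c => decide (c.length = m))).map ((2 : Int) :: ·)
            ++ ((Fm (n - 3) m).filter (fun c => decide (c.length = m))).map ((3 : Int) :: ·)))
        = ((Fm (n - 4) m).filter (fun c => decide (c.length = m))).map ((4 : Int) :: ·) := by
      apply List.filter_eq_self.mpr
      intro c hc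
      simp only [decide_eq_true_eq, List.mem_append, not_or]
      exact ⟨map_cons_ne_disjoint 2 4 (by norm_num) _ _ c hc,
        map_cons_ne_disjoint 3 4 (by norm_num) _ _ c hc⟩
    have hd23 : (((Fm (n - 3) m).filter (fun c => decide (c.length = m))).map ((3 : Int) :: ·)).filter
          (fun y => decide (y ∉ ((Fm (n - 2) m).filter (fun c => decide (c.length = m))).map ((2 : Int) :: ·)))
        = ((Fm (n - 3) m).filter (fun c => decide (c.length = m))).map ((3 : Int) :: ·) := by
      apply List.filter_eq_self.mpr
      intro c hc
      simp only [decide_eq_true_eq]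
      exact map_cons_ne_disjoint 2 3 (by norm_num) _ _ c hc
    rw [ofList_append, hd34, ofList_append, hd23]
    -- each block: commute ofList with map/filter, apply IH and filter_C
    have hx : ∀ x : Int,
        PySem.Set.ofList (((Fm (n - x) m).filter (fun c => decide (c.length = m))).map ((x : Int) :: ·))
          = (pvParts (n - x) m).map (x :: ·) := by
      intro x
      rw [ofList_map_cons, ofList_filter, ih (n - x), filter_C]
    rw [hx 2, hx 3, hx 4]
    -- and the B side
    have hC : Cm n (m + 1) = Cm n m ++ pvParts n (m + 1) := by
      unfold Cm
      rw [List.range_succ, List.flatMap_append]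
      simp
    have hg : ∀ x : Int, (if 0 ≤ n - x then (pvParts (n - x) m).map (x :: ·) else [])
        = (pvParts (n - x) m).map (x :: ·) := by
      intro x
      split
      · rfl
      · rw [parts_neg m (n - x) (by omega)]; rfl
    rw [hC]
    simp only [pvParts, List.flatMap_cons, List.flatMap_nil, List.append_nil]
    rw [hg 2, hg 3, hg 4, List.append_assoc]

theorem foldl_pref (d : List Int) : ∀ (a : Int) (l0 : List Int),
    (d.foldl (fun (s : Int × List Int) p => (s.1 + p, s.2 ++ [s.1 + p])) (a, l0)).2
      = l0 ++ (List.range d.length).map (fun j => a + (d.take (j + 1)).sum) := by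
  induction d with
  | nil => intro a l0; simp
  | cons p d ih =>
    intro a l0
    simp only [List.foldl_cons]
    rw [ih (a + p) (l0 ++ [a + p]), List.length_cons, List.range_succ_eq_map,
      List.map_cons, List.map_map, List.append_assoc]
    congr 1
    rw [List.singleton_append]
    have hh : a + ((p :: d).take (0 + 1)).sum = a + p := by simp
    rw [hh]
    congr 1
    apply List.map_congr_left
    intro j _
    simp only [Function.comp_apply, Nat.succ_eq_add_one, List.take_succ_cons, List.sum_cons]
    ring

theorem prefix_eq (c : List Int) :
    (0 :: (PySem.List.pyRange 0 ((PySem.List.slice c none (some (-1))).length : Int) 1).map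
        (fun i => PySem.List.pyGetD c i 0 + (PySem.List.slice c none (some i)).sum))
      = pvPrefix c := by
  simp only [pvPrefix, PySem.List.slice_to_neg_one]
  rw [foldl_pref c.dropLast 0 [], List.nil_append]
  congr 1
  rw [PySem.List.pyRange_zero_natCast, List.map_map]
  apply List.map_congr_left
  intro j hj
  have hj' : j < c.dropLast.length := List.mem_range.mp hj
  have hjc : j < c.length := by simp only [List.length_dropLast] at hj'; omega
  simp only [Function.comp_apply, PySem.List.pyGetD_natCast, PySem.List.slice_to_natCast]
  have htake : c.dropLast.take (j + 1) = c.take (j + 1) := by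
    rw [List.dropLast_eq_take, List.take_take]
    congr 1
    simp only [List.length_dropLast] at hj'
    omega
  rw [htake, List.take_add_one, List.sum_append]
  rw [List.getD_eq_getElem?_getD]
  simp only [List.getElem?_eq_getElem hjc, Option.toList_some, List.sum_cons,
    List.sum_nil, add_zero, Option.getD_some]
  ring

theorem ofList_eq_self_of_nodup (l : List (List Int)) (h : l.Nodup) :
    PySem.Set.ofList l = l := by
  induction l with
  | nil => rfl
  | cons x xs ih =>
    rw [PySem.Set.ofList_eq_foldl, List.foldl_cons]
    have hadd : PySem.Set.add ([] : PySem.Set (List Int)) x = [x] := rfl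
    rw [hadd]
    have := pvFoldlAdd xs [x] []
    simp only [List.append_nil] at this
    rw [this]
    have hf : xs.filter (fun y => decide (y ∉ [x])) = xs := by
      apply List.filter_eq_self.mpr
      intro y hy
      simp only [List.mem_singleton, decide_eq_true_eq]
      intro he
      subst he
      exact (List.nodup_cons.mp h).1 hy
    rw [hf, ← PySem.Set.ofList_eq_foldl, ih (List.nodup_cons.mp h).2]
    rfl

theorem ofList_idem (l : List (List Int)) :
    PySem.Set.ofList (PySem.Set.ofList l) = PySem.Set.ofList l :=
  ofList_eq_self_of_nodup _ (PySem.Set.nodup_ofList l)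

theorem foldl_update (f : Int → List (List Int)) (ks : List Int) : ∀ (s : PySem.Set (List Int)),
    ks.foldl (fun s k => PySem.Set.update s (f k)) s
      = (ks.flatMap f).foldl PySem.Set.add s := by
  induction ks with
  | nil => intro s; rfl
  | cons k ks ih =>
    intro s
    rw [List.foldl_cons, List.flatMap_cons, List.foldl_append, ih]
    rfl

-- ===== VERDICT (by name: the statement is the Claim_ definition above) =====
theorem potential_strong_beat_permutations_spec : Claim_equal_potential_strong_beat_permutations := by
  intro n _
  unfold Spec_potential_strong_beat_permutations
  unfold potential_strong_beat_permutations potential_strong_beat_permutations_alt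
  by_cases h : n ≤ 4
  · rw [if_pos h, if_pos h]
  · rw [if_neg h, if_neg h]
    have h5 : 5 ≤ n := by omega
    have hrep : (PySem.List.pyRange 0 (PySem.Int.floordiv n 2) 1).map
          (fun _ => ([0, 2, 3, 4] : List Int))
        = List.replicate (PySem.Int.floordiv n 2).toNat [0, 2, 3, 4] := by
      rw [List.map_const', PySem.List.length_pyRange_one]
      norm_num
    have hpre : (fun sublist : List Int =>
          0 :: (PySem.List.pyRange 0 ((PySem.List.slice sublist none (some (-1))).length : Int) 1).map
            (fun i => PySem.List.pyGetD sublist i 0 + (PySem.List.slice sublist none (some i)).sum))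
        = pvPrefix := funext prefix_eq
    simp only [hrep, hpre]
    have hA : PySem.Set.ofList
          (((pyProduct (List.replicate (PySem.Int.floordiv n 2).toNat [0, 2, 3, 4])).filter
            (fun i => i.sum == n)).map (fun u => u.filter (fun j => j != 0)))
        = Cm n (PySem.Int.floordiv n 2).toNat := ofList_F _ n
    -- B's set: fold of updates = ofList of the flatMap of parts
    rw [foldl_update, PySem.List.pyRange_one, List.flatMap_map]
    have harg : (PySem.Int.floordiv n 2 + 1 - 1).toNat = (PySem.Int.floordiv n 2).toNat := by
      omega
    rw [harg]
    have hfun : (fun k : Nat => pvParts n ((1 + (k : Int)).toNat))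
        = (fun k : Nat => pvParts n (k + 1)) := by
      funext k
      congr 1
      omega
    rw [hfun]
    -- the flatMap over k = 1..m is Cm n m (the k = 0 block is empty since n ≠ 0)
    have hL : (List.range (PySem.Int.floordiv n 2).toNat).flatMap (fun k => pvParts n (k + 1))
        = Cm n (PySem.Int.floordiv n 2).toNat := by
      unfold Cm
      rw [List.range_succ_eq_map, List.flatMap_cons, List.flatMap_map]
      have h0 : pvParts n 0 = [] := by simp only [pvParts]; rw [if_neg (by omega)]
      rw [h0, List.nil_append]
    rw [hL]
    have hemp : (PySem.Set.empty : PySem.Set (List Int)) = [] := rfl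
    rw [hemp, ← PySem.Set.ofList_eq_foldl, ← hA, ofList_idem]
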